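-- pv_equiv track=rewrite | github.com/pypi-data/pypi-mirror-351 | packages/makex/makex-20250502.tar.gz/makex-20250502/python/makex/build_path.py | _serialize_variants
-- ===== SOURCE A (Python) =====
-- VARIANT_SEPARATOR = ","
--
-- def _serialize_variants(strings, variant_separator=VARIANT_SEPARATOR):
--     if not strings:
--         return ""
--
--     # XXX: the user might pass multiple variants in one -v argument
--     strs = []
--     for string in strings:
--         strs.extend(string.split(VARIANT_SEPARATOR))
--
--     bounded = []
--     unbounded = []
--     # first sort by bound variants, then by unbound
--     for variant in sorted(strs):
--         if "=" in variant:
--             bounded.append(variant)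
--         else:
--             unbounded.append(variant)
--
--     variants_string = variant_separator.join(sorted(bounded) + sorted(unbounded))
--     return variants_string
-- ===== SOURCE B (Python) =====
-- VARIANT_SEPARATOR = ","
--
-- def _serialize_variants(strings, variant_separator=VARIANT_SEPARATOR):
--     flat = [v for s in strings for v in s.split(VARIANT_SEPARATOR)]
--     flat.sort(key=lambda v: (0 if "=" in v else 1, v))
--     return variant_separator.join(flat)
-- ===== Notes on version B (the rewrite author's own statement) =====
-- stated objective: simpler
-- what changed: Replaces A's partition-into-two-lists loop and its three sorts with one flatten comprehension and a single composite-key sort ((0 if '=' in v else 1, v)) followed by a join.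
import Mathlib
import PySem

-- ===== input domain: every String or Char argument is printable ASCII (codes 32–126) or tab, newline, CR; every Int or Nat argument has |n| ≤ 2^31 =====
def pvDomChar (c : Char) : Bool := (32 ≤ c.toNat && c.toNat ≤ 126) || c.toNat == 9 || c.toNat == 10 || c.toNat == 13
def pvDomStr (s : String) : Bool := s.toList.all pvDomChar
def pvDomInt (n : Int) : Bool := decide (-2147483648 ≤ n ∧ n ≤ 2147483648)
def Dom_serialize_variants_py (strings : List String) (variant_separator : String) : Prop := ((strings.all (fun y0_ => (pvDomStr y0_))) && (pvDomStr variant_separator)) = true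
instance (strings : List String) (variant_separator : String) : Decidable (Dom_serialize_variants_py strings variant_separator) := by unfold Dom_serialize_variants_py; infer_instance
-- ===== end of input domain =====

-- B replaces A's partition loop and three sorts by one flatten and a single composite-key stable sort (simpler decomposition, same result).

-- ===== PORT A =====
-- literal transliteration of _serialize_variants: early return on empty list, extend-split
-- loop, partition of sorted strs into bounded/unbounded, join of the two re-sorted lists.
def serialize_variants_py (strings : List String) (variant_separator : String) : String :=
  if strings = [] then ""
  else
    let strs := strings.foldl (fun acc s => acc ++ (PySem.Str.split? s ",").getD []) ([] : List String)
    let bu := (PySem.List.sorted strs (fun v => v) false).foldl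
      (fun (q : List String × List String) v =>
        if PySem.Str.isIn "=" v then (q.1 ++ [v], q.2) else (q.1, q.2 ++ [v]))
      (([], []) : List String × List String)
    PySem.Str.join variant_separator
      (PySem.List.sorted bu.1 (fun v => v) false ++ PySem.List.sorted bu.2 (fun v => v) false)


-- ===== PORT B =====
-- literal transliteration of B (Source B): flatten comprehension, one composite-key sort, join.
def serialize_variants_py_alt (strings : List String) (variant_separator : String) : String :=
  let flat := strings.flatMap (fun s => (PySem.Str.split? s ",").getD [])
  PySem.Str.join variant_separator
    (PySem.List.sorted2 flat (fun v => if PySem.Str.isIn "=" v then (0 : Int) else 1) (fun v => v) false)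


-- ===== PRECONDITION & SPEC =====
def Spec_serialize_variants_py (strings : List String) (variant_separator : String) (out : String) : Prop := out = serialize_variants_py_alt strings variant_separator
instance (strings : List String) (variant_separator : String) (out : String) : Decidable (Spec_serialize_variants_py strings variant_separator out) := by unfold Spec_serialize_variants_py; infer_instance

-- ===== CLAIM (what is proved, stated in full; the proofs are below) =====
def Claim_equal_serialize_variants_py : Prop := ∀ (strings : List String) (variant_separator : String), Dom_serialize_variants_py strings variant_separator → Spec_serialize_variants_py strings variant_separator (serialize_variants_py strings variant_separator)

-- ===== LEMMAS AND PROOFS =====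

def pvLt2 (p : String → Bool) (a b : String) : Bool :=
  decide ((if p a then (0 : Int) else 1) < (if p b then (0 : Int) else 1)) ||
    (!decide ((if p b then (0 : Int) else 1) < (if p a then (0 : Int) else 1)) && decide (a < b))
def pvLt1 (a b : String) : Bool := decide (a < b)

lemma pvLt2_eq_pvLt1_of_eq {p : String → Bool} {a b : String} (h : p a = p b) : pvLt2 p a b = pvLt1 a b := by
  cases ha : p a <;> simp [pvLt2, pvLt1, ha, h.symm.trans ha]

lemma pvLt2_tt_ff {p : String → Bool} {a b : String} (ha : p a = true) (hb : p b = false) : pvLt2 p a b = true := by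
  simp [pvLt2, ha, hb]

lemma pvLt2_ff_tt {p : String → Bool} {a b : String} (ha : p a = false) (hb : p b = true) : pvLt2 p a b = false := by
  simp [pvLt2, ha, hb]

lemma insertBy_pvLt2_bounded {p : String → Bool} (x : String) (hx : p x = true) :
    ∀ (B U : List String), (∀ b ∈ B, p b = true) → (∀ u ∈ U, p u = false) →
      PySem.List.insertBy (pvLt2 p) x (B ++ U) = PySem.List.insertBy pvLt1 x B ++ U := by
  intro B
  induction B with
  | nil =>
    intro U _ hU
    cases U with
    | nil => simp [PySem.List.insertBy]
    | cons u U' =>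
      simp [PySem.List.insertBy, pvLt2_tt_ff hx (hU u (by simp))]
  | cons b B' ih =>
    intro U hB hU
    have hb : p b = true := hB b (by simp)
    have h12 : pvLt2 p x b = pvLt1 x b := pvLt2_eq_pvLt1_of_eq (hx.trans hb.symm)
    cases h : pvLt1 x b <;>
      simp [PySem.List.insertBy, h12, h, ih U (fun y hy => hB y (by simp [hy])) hU]

lemma insertBy_pvLt2_unbounded {p : String → Bool} (x : String) (hx : p x = false) :
    ∀ (B U : List String), (∀ b ∈ B, p b = true) → (∀ u ∈ U, p u = false) →
      PySem.List.insertBy (pvLt2 p) x (B ++ U) = B ++ PySem.List.insertBy pvLt1 x U := by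
  intro B
  induction B with
  | nil =>
    intro U _ hU
    induction U with
    | nil => simp [PySem.List.insertBy]
    | cons u U' ihU =>
      have hu : p u = false := hU u (by simp)
      have h12 : pvLt2 p x u = pvLt1 x u := pvLt2_eq_pvLt1_of_eq (hx.trans hu.symm)
      have ihU' := ihU (fun y hy => hU y (by simp [hy]))
      simp only [List.nil_append] at ihU'
      cases h : pvLt1 x u <;>
        simp [PySem.List.insertBy, h12, h, ihU']
  | cons b B' ih =>
    intro U hB hU
    have hb : p b = true := hB b (by simp)
    simp [PySem.List.insertBy, pvLt2_ff_tt hx hb, ih U (fun y hy => hB y (by simp [hy])) hU]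

lemma filter_sorted_eq (xs : List String) (p : String → Bool) :
    (PySem.List.sorted xs (fun v => v) false).filter p
      = PySem.List.sorted (xs.filter p) (fun v => v) false := by
  apply Eq.symm
  apply PySem.List.sorted_id_eq_of_perm_of_pairwise
  · exact (PySem.List.sorted_perm xs (fun v => v) false).filter p
  · exact (PySem.List.sorted_pairwise xs (fun v => v)).sublist List.filter_sublist

lemma sorted2_eq_append (p : String → Bool) (xs : List String) :
    PySem.List.sorted2 xs (fun v => if p v then (0 : Int) else 1) (fun v => v) false
      = PySem.List.sorted (xs.filter p) (fun v => v) false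
        ++ PySem.List.sorted (xs.filter (fun v => !p v)) (fun v => v) false := by
  have key : ∀ ys : List String,
      ys.foldl (fun acc x => PySem.List.insertBy (pvLt2 p) x acc) []
        = (ys.filter p).foldl (fun acc x => PySem.List.insertBy pvLt1 x acc) []
          ++ (ys.filter (fun v => !p v)).foldl (fun acc x => PySem.List.insertBy pvLt1 x acc) [] := by
    intro ys
    induction ys using List.reverseRecOn with
    | nil => rfl
    | append_singleton t x ih =>
      have hBmem : ∀ b ∈ (t.filter p).foldl (fun acc x => PySem.List.insertBy pvLt1 x acc) [], p b = true := by
        intro b hb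
        have : b ∈ t.filter p := by
          have := PySem.List.sorted_perm (t.filter p) (fun v => v) false
          exact this.mem_iff.mp hb
        exact (List.mem_filter.mp this).2
      have hUmem : ∀ u ∈ (t.filter (fun v => !p v)).foldl (fun acc x => PySem.List.insertBy pvLt1 x acc) [], p u = false := by
        intro u hu
        have : u ∈ t.filter (fun v => !p v) := by
          have := PySem.List.sorted_perm (t.filter (fun v => !p v)) (fun v => v) false
          exact this.mem_iff.mp hu
        simpa using (List.mem_filter.mp this).2
      rw [List.foldl_append, List.foldl_cons, List.foldl_nil, ih]
      cases hx : p x with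
      | true =>
        rw [insertBy_pvLt2_bounded x hx _ _ hBmem hUmem]
        rw [List.filter_append, List.filter_append]
        simp [hx, List.foldl_append]
      | false =>
        rw [insertBy_pvLt2_unbounded x hx _ _ hBmem hUmem]
        rw [List.filter_append, List.filter_append]
        simp [hx, List.foldl_append]
  exact key xs

lemma pairFold_eq (p : String → Bool) (l : List String) (acc : List String × List String) :
    l.foldl (fun (q : List String × List String) v =>
        if p v then (q.1 ++ [v], q.2) else (q.1, q.2 ++ [v])) acc
      = (acc.1 ++ l.filter p, acc.2 ++ l.filter (fun v => !p v)) := by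
  induction l generalizing acc with
  | nil => simp
  | cons v t ih => cases h : p v <;> simp [h, ih]

lemma main_eq (strings : List String) (variant_separator : String) :
    serialize_variants_py strings variant_separator = serialize_variants_py_alt strings variant_separator := by
  by_cases h : strings = []
  · subst h
    rfl
  · simp only [serialize_variants_py, serialize_variants_py_alt, if_neg h]
    rw [PySem.List.foldl_append_eq_flatMap, List.nil_append]
    rw [pairFold_eq]
    rw [sorted2_eq_append]
    simp only [List.nil_append]
    rw [filter_sorted_eq, filter_sorted_eq, PySem.List.sorted_sorted, PySem.List.sorted_sorted]

-- ===== VERDICT (by name: the statement is the Claim_ definition above) =====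
theorem serialize_variants_py_spec : Claim_equal_serialize_variants_py := by
  intro strings variant_separator _
  exact main_eq strings variant_separator
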